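-- pv_equiv track=rewrite | github.com/Mindful/wordgen | word_gen.py | _generate_diagonals
-- ===== SOURCE A (Python) =====
-- def _generate_diagonals(lhs_size: int, rhs_size: int):
--     """
--     Lazily generate the sequence for two lists of lengths n and m.
--     Avoid duplicate pairs and generate in the desired order.
--     """
--     seen = set()  # To track generated pairs and avoid duplicates
--     for d in range(lhs_size + rhs_size - 1):  # Diagonal levels
--         for i in range(d + 1):
--             j = d - i
--             if i < lhs_size and j < rhs_size and (i, j) not in seen:  # Valid pair
--                 yield i, j
--                 seen.add((i, j))  # Mark as seen
--             if j < lhs_size and i < rhs_size and (j, i) not in seen:  # Valid symmetric pair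
--                 yield j, i
--                 seen.add((j, i))
-- ===== SOURCE B (Python) =====
-- def _generate_diagonals(lhs_size: int, rhs_size: int):
--     """
--     Lazily generate the same pair sequence without a seen-set: on diagonal d a
--     pair is new exactly when i <= d//2, the pair (i, d-i) exists only for i in
--     [d-m+1, n-1] and the symmetric (d-i, i) only for i in [d-n+1, m-1], so
--     iterate just the hull of those two windows and emit (i, j) then, when
--     i != j, (j, i).
--     """
--     n, m = lhs_size, rhs_size
--     for d in range(n + m - 1):
--         h = d // 2
--         a1 = max(0, d - m + 1)
--         b1 = min(h, n - 1)
--         a2 = max(0, d - n + 1)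
--         b2 = min(h, m - 1)
--         if a1 > b1:
--             a1, b1 = a2, b2
--         elif a2 <= b2:
--             a1, b1 = min(a1, a2), max(b1, b2)
--         for i in range(a1, b1 + 1):
--             j = d - i
--             if i < n and j < m:
--                 yield i, j
--             if i != j and j < n and i < m:
--                 yield j, i
-- ===== Notes on version B (the rewrite author's own statement) =====
-- stated objective: faster
-- what changed: B drops the seen-set entirely: on diagonal d a pair is new exactly when i <= d//2, (i, d-i) exists only for i in [d-m+1, n-1] and (d-i, i) only for i in [d-n+1, m-1], so B iterates just the hull of those two windows per diagonal instead of A's full 0..d scan with duplicate bookkeeping.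
import Mathlib
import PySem

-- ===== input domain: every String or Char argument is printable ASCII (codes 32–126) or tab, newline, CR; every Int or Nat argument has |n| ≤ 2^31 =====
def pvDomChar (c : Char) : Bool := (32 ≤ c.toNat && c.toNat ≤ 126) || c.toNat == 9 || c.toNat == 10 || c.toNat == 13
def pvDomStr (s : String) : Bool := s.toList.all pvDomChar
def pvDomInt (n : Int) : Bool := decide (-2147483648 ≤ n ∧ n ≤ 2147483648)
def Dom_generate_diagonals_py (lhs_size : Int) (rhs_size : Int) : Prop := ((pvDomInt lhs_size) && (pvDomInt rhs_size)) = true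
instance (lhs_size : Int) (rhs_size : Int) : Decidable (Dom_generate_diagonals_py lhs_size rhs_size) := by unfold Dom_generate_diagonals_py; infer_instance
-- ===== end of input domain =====

-- B removes A's seen-set and per diagonal iterates only the index window that can emit a pair,
-- producing the same list in the same order (objective: faster; A scans every i in 0..d per diagonal).

-- ===== PORT A =====
-- one i-step of A's inner loop on diagonal d: try (i, d-i), then the symmetric (d-i, i),
-- each guarded by the bounds checks and the seen set (state = (output list, seen set))
def genDiagStepA (n m d : Int) (st : List (Int × Int) × PySem.Set (Int × Int)) (i : Int) :
    List (Int × Int) × PySem.Set (Int × Int) :=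
  let j := d - i
  let st1 :=
    if i < n ∧ j < m ∧ (i, j) ∉ st.2 then (st.1 ++ [(i, j)], PySem.Set.add st.2 (i, j)) else st
  if j < n ∧ i < m ∧ (j, i) ∉ st1.2 then (st1.1 ++ [(j, i)], PySem.Set.add st1.2 (j, i)) else st1

def generate_diagonals_py (lhs_size : Int) (rhs_size : Int) : List (Int × Int) :=
  ((PySem.List.pyRange 0 (lhs_size + rhs_size - 1) 1).foldl
      (fun st d => (PySem.List.pyRange 0 (d + 1) 1).foldl (genDiagStepA lhs_size rhs_size d) st)
      ([], PySem.Set.empty)).1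

-- ===== PORT B =====
-- one i-step of B's inner loop on diagonal d: emit (i, j), then (j, i) when i ≠ j, bounds-checked
def genDiagStepB (n m d : Int) (out : List (Int × Int)) (i : Int) : List (Int × Int) :=
  let j := d - i
  let out1 := if i < n ∧ j < m then out ++ [(i, j)] else out
  if i ≠ j ∧ j < n ∧ i < m then out1 ++ [(j, i)] else out1

-- one diagonal of B: the hull of the two valid index windows, then the inner loop over it
def genDiagB (n m : Int) (out : List (Int × Int)) (d : Int) : List (Int × Int) :=
  let h := PySem.Int.floordiv d 2
  let a1 := max 0 (d - m + 1)
  let b1 := min h (n - 1)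
  let a2 := max 0 (d - n + 1)
  let b2 := min h (m - 1)
  let w : Int × Int :=
    if a1 > b1 then (a2, b2)
    else if a2 ≤ b2 then (min a1 a2, max b1 b2)
    else (a1, b1)
  (PySem.List.pyRange w.1 (w.2 + 1) 1).foldl (genDiagStepB n m d) out

def generate_diagonals_py_alt (lhs_size : Int) (rhs_size : Int) : List (Int × Int) :=
  (PySem.List.pyRange 0 (lhs_size + rhs_size - 1) 1).foldl (genDiagB lhs_size rhs_size) []

-- ===== PRECONDITION & SPEC =====
def Spec_generate_diagonals_py (lhs_size : Int) (rhs_size : Int) (out : List (Int × Int)) : Prop := out = generate_diagonals_py_alt lhs_size rhs_size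
instance (lhs_size : Int) (rhs_size : Int) (out : List (Int × Int)) : Decidable (Spec_generate_diagonals_py lhs_size rhs_size out) := by unfold Spec_generate_diagonals_py; infer_instance

-- ===== CLAIM (what is proved, stated in full; the proofs are below) =====
def Claim_equal_generate_diagonals_py : Prop := ∀ (lhs_size : Int) (rhs_size : Int), Dom_generate_diagonals_py lhs_size rhs_size → Spec_generate_diagonals_py lhs_size rhs_size (generate_diagonals_py lhs_size rhs_size)

-- ===== LEMMAS AND PROOFS =====

-- the pairs diagonal d yields at inner index i (first occurrences only: the pair (i, d-i) is
-- new exactly when 2*i ≤ d, and the symmetric (d-i, i) exactly when 2*i < d)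
def pvEmit (n m d i : Int) : List (Int × Int) :=
  (if i < n ∧ d - i < m ∧ 2 * i ≤ d then [(i, d - i)] else []) ++
  (if d - i < n ∧ i < m ∧ 2 * i < d then [(d - i, i)] else [])

-- everything diagonal d yields
def pvDiag (n m d : Int) : List (Int × Int) :=
  (PySem.List.pyRange 0 (d + 1) 1).flatMap (pvEmit n m d)

lemma pvMemEmit (n m d i x y : Int) :
    (x, y) ∈ pvEmit n m d i ↔
      ((x = i ∧ y = d - i ∧ x < n ∧ y < m ∧ 2 * i ≤ d) ∨
       (x = d - i ∧ y = i ∧ x < n ∧ y < m ∧ 2 * i < d)) := by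
  by_cases h1 : i < n ∧ d - i < m ∧ 2 * i ≤ d <;>
    by_cases h2 : d - i < n ∧ i < m ∧ 2 * i < d <;>
      simp [pvEmit, h1, h2, Prod.mk.injEq] <;> omega

lemma pvEmit_sum (n m d i : Int) (p : Int × Int) (hp : p ∈ pvEmit n m d i) :
    p.1 + p.2 = d := by
  obtain ⟨x, y⟩ := p
  rw [pvMemEmit] at hp
  rcases hp with h | h <;> simp <;> omega

lemma pvStepA (n m d k : Int) (out : List (Int × Int)) (S : PySem.Set (Int × Int))
    (hk0 : 0 ≤ k) (hkd : k ≤ d)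
    (hS : ∀ x y : Int, x + y = d →
      ((x, y) ∈ S ↔ x < n ∧ y < m ∧
        ((0 ≤ x ∧ x < k ∧ 2 * x ≤ d) ∨ (0 ≤ y ∧ y < k ∧ 2 * y < d)))) :
    (genDiagStepA n m d (out, S) k).1 = out ++ pvEmit n m d k ∧
    ∀ p : Int × Int, p ∈ (genDiagStepA n m d (out, S) k).2 ↔ p ∈ S ∨ p ∈ pvEmit n m d k := by
  have hmem1 : ((k, d - k) ∈ S) ↔ (k < n ∧ d - k < m ∧ d < 2 * k) := by
    rw [hS k (d - k) (by omega)]; omega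
  have hmem2 : ((d - k, k) ∈ S) ↔ (d - k < n ∧ k < m ∧ d < 2 * k) := by
    rw [hS (d - k) k (by omega)]; omega
  simp only [genDiagStepA, pvEmit]
  by_cases hA1 : k < n ∧ d - k < m ∧ 2 * k ≤ d
  · have hc1 : k < n ∧ d - k < m ∧ (k, d - k) ∉ S :=
      ⟨hA1.1, hA1.2.1, by simp only [hmem1]; omega⟩
    rw [if_pos hc1]
    by_cases hA2 : d - k < n ∧ k < m ∧ 2 * k < d
    · have hc2 : d - k < n ∧ k < m ∧
          (d - k, k) ∉ (out ++ [(k, d - k)], PySem.Set.add S (k, d - k)).2 :=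
        ⟨hA2.1, hA2.2.1, by
          dsimp only
          simp only [PySem.Set.mem_add, hmem2, Prod.mk.injEq]
          omega⟩
      rw [if_pos hc2, if_pos hA1, if_pos hA2]
      refine ⟨by simp, fun p => ?_⟩
      dsimp only
      simp only [PySem.Set.mem_add, List.mem_append, List.mem_singleton]
      tauto
    · have hc2 : ¬(d - k < n ∧ k < m ∧
          (d - k, k) ∉ (out ++ [(k, d - k)], PySem.Set.add S (k, d - k)).2) := by
        rintro ⟨a, b, c⟩
        apply c
        dsimp only
        simp only [PySem.Set.mem_add, hmem2, Prod.mk.injEq]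
        omega
      rw [if_neg hc2, if_pos hA1, if_neg hA2]
      refine ⟨by simp, fun p => ?_⟩
      dsimp only
      simp only [PySem.Set.mem_add, List.mem_append, List.mem_singleton, List.not_mem_nil, or_false]
  · have hc1 : ¬(k < n ∧ d - k < m ∧ (k, d - k) ∉ S) := by
      simp only [hmem1, not_and]; omega
    rw [if_neg hc1]
    by_cases hA2 : d - k < n ∧ k < m ∧ 2 * k < d
    · have hc2 : d - k < n ∧ k < m ∧ (d - k, k) ∉ (out, S).2 :=
        ⟨hA2.1, hA2.2.1, by dsimp only; simp only [hmem2]; omega⟩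
      rw [if_pos hc2, if_neg hA1, if_pos hA2]
      refine ⟨by simp, fun p => ?_⟩
      dsimp only
      simp only [PySem.Set.mem_add, List.mem_append, List.mem_singleton, List.not_mem_nil, false_or]
    · have hc2 : ¬(d - k < n ∧ k < m ∧ (d - k, k) ∉ (out, S).2) := by
        rintro ⟨a, b, c⟩
        apply c
        dsimp only
        simp only [hmem2]
        omega
      rw [if_neg hc2, if_neg hA1, if_neg hA2]
      refine ⟨by simp, fun p => ?_⟩
      dsimp only
      simp

lemma pvInnerA (n m d : Int) :
    ∀ (t : Nat) (k : Int) (out : List (Int × Int)) (S : PySem.Set (Int × Int)),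
      0 ≤ k → k + (t : Int) = d + 1 →
      (∀ x y : Int, x + y = d → ((x, y) ∈ S ↔ x < n ∧ y < m ∧
          ((0 ≤ x ∧ x < k ∧ 2 * x ≤ d) ∨ (0 ≤ y ∧ y < k ∧ 2 * y < d)))) →
      ((PySem.List.pyRange k (d + 1) 1).foldl (genDiagStepA n m d) (out, S)).1
          = out ++ (PySem.List.pyRange k (d + 1) 1).flatMap (pvEmit n m d) ∧
      ∀ p : Int × Int,
        p ∈ ((PySem.List.pyRange k (d + 1) 1).foldl (genDiagStepA n m d) (out, S)).2 ↔
          p ∈ S ∨ p ∈ (PySem.List.pyRange k (d + 1) 1).flatMap (pvEmit n m d) := by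
  intro t
  induction t with
  | zero =>
    intro k out S hk0 hkt hS
    rw [PySem.List.pyRange_one_eq_nil (by push_cast at hkt; omega)]
    simp
  | succ t ih =>
    intro k out S hk0 hkt hS
    push_cast at hkt
    have hk : k < d + 1 := by omega
    rw [PySem.List.pyRange_one_cons hk]
    simp only [List.foldl_cons, List.flatMap_cons]
    obtain ⟨hs1, hs2⟩ := pvStepA n m d k out S hk0 (by omega) hS
    rcases hE : genDiagStepA n m d (out, S) k with ⟨o2, S2⟩
    rw [hE] at hs1 hs2
    dsimp only at hs1 hs2
    have hinv : ∀ x y : Int, x + y = d → ((x, y) ∈ S2 ↔ x < n ∧ y < m ∧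
        ((0 ≤ x ∧ x < k + 1 ∧ 2 * x ≤ d) ∨ (0 ≤ y ∧ y < k + 1 ∧ 2 * y < d))) := by
      intro x y hxy
      rw [hs2 (x, y), hS x y hxy, pvMemEmit]
      omega
    obtain ⟨ih1, ih2⟩ := ih (k + 1) o2 S2 (by omega) (by omega) hinv
    refine ⟨?_, fun p => ?_⟩
    · rw [ih1, hs1, List.append_assoc]
    · rw [ih2 p, hs2 p, List.mem_append]
      tauto

lemma pvOuterA (n m : Int) (t : Nat) :
    (((PySem.List.pyRange 0 (t : Int) 1).foldl
        (fun st d => (PySem.List.pyRange 0 (d + 1) 1).foldl (genDiagStepA n m d) st)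
        ([], PySem.Set.empty)).1
      = (PySem.List.pyRange 0 (t : Int) 1).flatMap (pvDiag n m)) ∧
    ∀ p : Int × Int,
      p ∈ ((PySem.List.pyRange 0 (t : Int) 1).foldl
        (fun st d => (PySem.List.pyRange 0 (d + 1) 1).foldl (genDiagStepA n m d) st)
        ([], PySem.Set.empty)).2 → p.1 + p.2 < (t : Int) := by
  induction t with
  | zero =>
    rw [PySem.List.pyRange_one_eq_nil (by omega)]
    simp [PySem.Set.empty]
  | succ t ih =>
    obtain ⟨ih1, ih2⟩ := ih
    have hcast : ((t + 1 : Nat) : Int) = (t : Int) + 1 := by push_cast; ring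
    rw [hcast, PySem.List.pyRange_one_succ_right (by omega), List.foldl_append,
      List.flatMap_append]
    rcases hG : (PySem.List.pyRange 0 (t : Int) 1).foldl
        (fun st d => (PySem.List.pyRange 0 (d + 1) 1).foldl (genDiagStepA n m d) st)
        ([], PySem.Set.empty) with ⟨O, S⟩
    rw [hG] at ih2
    simp only [List.foldl_cons, List.foldl_nil] at ih1 ⊢
    have hinv : ∀ x y : Int, x + y = (t : Int) → ((x, y) ∈ S ↔ x < n ∧ y < m ∧
        ((0 ≤ x ∧ x < 0 ∧ 2 * x ≤ (t : Int)) ∨ (0 ≤ y ∧ y < 0 ∧ 2 * y < (t : Int)))) := by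
      intro x y hxy
      constructor
      · intro h
        have := ih2 (x, y) h
        dsimp only at this
        omega
      · rintro ⟨_, _, h | h⟩ <;> omega
    obtain ⟨i1, i2⟩ := pvInnerA n m (t : Int) (t + 1) 0 O S (by omega) (by push_cast; omega) hinv
    refine ⟨?_, fun p hp => ?_⟩
    · rw [i1]
      rw [hG] at ih1
      dsimp only at ih1
      rw [ih1]
      simp [pvDiag]
    · rw [i2 p] at hp
      rcases hp with hp | hp
      · have := ih2 p hp
        omega
      · rcases List.mem_flatMap.1 hp with ⟨i, _, hpe⟩
        have := pvEmit_sum n m (t : Int) i p hpe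
        omega

lemma pvA_eq_flat (n m : Int) :
    generate_diagonals_py n m
      = (PySem.List.pyRange 0 (n + m - 1) 1).flatMap (pvDiag n m) := by
  unfold generate_diagonals_py
  by_cases h : 0 ≤ n + m - 1
  · have hcast : n + m - 1 = (((n + m - 1).toNat : Nat) : Int) := by omega
    rw [hcast]
    exact (pvOuterA n m (n + m - 1).toNat).1
  · rw [PySem.List.pyRange_one_eq_nil (by omega)]
    simp

lemma pvInnerB (n m d s e : Int) (hd : 0 ≤ d) (hs0 : 0 ≤ s) (hse : s ≤ e + 1)
    (he : 2 * e ≤ d)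
    (h1 : ∀ i : Int, 0 ≤ i → i < s → pvEmit n m d i = [])
    (h2 : ∀ i : Int, e < i → i ≤ d → pvEmit n m d i = [])
    (out : List (Int × Int)) :
    (PySem.List.pyRange s (e + 1) 1).foldl (genDiagStepB n m d) out = out ++ pvDiag n m d := by
  have hcong : ∀ i ∈ PySem.List.pyRange s (e + 1) 1, ∀ acc : List (Int × Int),
      genDiagStepB n m d acc i = acc ++ pvEmit n m d i := by
    intro i hi acc
    rw [PySem.List.mem_pyRange_one] at hi
    have h2i : 2 * i ≤ d := by omega
    simp only [genDiagStepB, pvEmit]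
    by_cases hc1 : i < n ∧ d - i < m
    · rw [if_pos hc1, if_pos (show i < n ∧ d - i < m ∧ 2 * i ≤ d from ⟨hc1.1, hc1.2, h2i⟩)]
      by_cases hc2 : d - i < n ∧ i < m ∧ 2 * i < d
      · rw [if_pos (show i ≠ d - i ∧ d - i < n ∧ i < m from ⟨by omega, hc2.1, hc2.2.1⟩),
          if_pos hc2, List.append_assoc]
      · rw [if_neg (show ¬(i ≠ d - i ∧ d - i < n ∧ i < m) from by omega), if_neg hc2]
        simp
    · rw [if_neg hc1, if_neg (show ¬(i < n ∧ d - i < m ∧ 2 * i ≤ d) from by omega)]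
      by_cases hc2 : d - i < n ∧ i < m ∧ 2 * i < d
      · rw [if_pos (show i ≠ d - i ∧ d - i < n ∧ i < m from ⟨by omega, hc2.1, hc2.2.1⟩),
          if_pos hc2]
        simp
      · rw [if_neg (show ¬(i ≠ d - i ∧ d - i < n ∧ i < m) from by omega), if_neg hc2]
        simp
  rw [PySem.List.foldl_congr_mem' _ _ _ out hcong, PySem.List.foldl_append_eq_flatMap]
  have hflat : (PySem.List.pyRange s (e + 1) 1).flatMap (pvEmit n m d) = pvDiag n m d := by
    unfold pvDiag
    rw [PySem.List.pyRange_one_append 0 s (d + 1) hs0 (by omega),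
      PySem.List.pyRange_one_append s (e + 1) (d + 1) hse (by omega),
      List.flatMap_append, List.flatMap_append]
    have e1 : (PySem.List.pyRange 0 s 1).flatMap (pvEmit n m d) = [] := by
      apply List.flatMap_eq_nil_iff.mpr
      intro i hi
      rw [PySem.List.mem_pyRange_one] at hi
      exact h1 i hi.1 hi.2
    have e2 : (PySem.List.pyRange (e + 1) (d + 1) 1).flatMap (pvEmit n m d) = [] := by
      apply List.flatMap_eq_nil_iff.mpr
      intro i hi
      rw [PySem.List.mem_pyRange_one] at hi
      exact h2 i (by omega) (by omega)
    rw [e1, e2]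
    simp
  rw [hflat]

lemma pvDiagB_eq (n m d : Int) (hd : 0 ≤ d) (out : List (Int × Int)) :
    genDiagB n m out d = out ++ pvDiag n m d := by
  unfold genDiagB
  have hq := PySem.Int.floordiv_mul_add_mod d 2
  have hr0 : 0 ≤ PySem.Int.mod d 2 := PySem.Int.mod_nonneg d (by norm_num)
  have hr2 : PySem.Int.mod d 2 < 2 := PySem.Int.mod_lt d (by norm_num)
  set q := PySem.Int.floordiv d 2 with hqd
  set r := PySem.Int.mod d 2 with hrd
  dsimp only
  by_cases hb1 : max 0 (d - m + 1) > min q (n - 1)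
  · rw [if_pos hb1]
    by_cases hw : max 0 (d - n + 1) ≤ min q (m - 1)
    · exact pvInnerB n m d (max 0 (d - n + 1)) (min q (m - 1)) hd (le_max_left _ _)
        (by omega) (by omega)
        (fun i hi0 his => by
          simp only [pvEmit]
          rw [if_neg (by omega), if_neg (by omega)]
          rfl)
        (fun i hie hid => by
          simp only [pvEmit]
          rw [if_neg (by omega), if_neg (by omega)]
          rfl)
        out
    · rw [PySem.List.pyRange_one_eq_nil (by omega)]
      have hnil : pvDiag n m d = [] := by
        unfold pvDiag
        apply List.flatMap_eq_nil_iff.mpr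
        intro i hi
        rw [PySem.List.mem_pyRange_one] at hi
        simp only [pvEmit]
        rw [if_neg (by omega), if_neg (by omega)]
        rfl
      rw [hnil]
      simp
  · rw [if_neg hb1]
    by_cases hw : max 0 (d - n + 1) ≤ min q (m - 1)
    · rw [if_pos hw]
      exact pvInnerB n m d (min (max 0 (d - m + 1)) (max 0 (d - n + 1)))
        (max (min q (n - 1)) (min q (m - 1))) hd (by omega) (by omega) (by omega)
        (fun i hi0 his => by
          simp only [pvEmit]
          rw [if_neg (by omega), if_neg (by omega)]
          rfl)
        (fun i hie hid => by
          simp only [pvEmit]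
          rw [if_neg (by omega), if_neg (by omega)]
          rfl)
        out
    · rw [if_neg hw]
      exact pvInnerB n m d (max 0 (d - m + 1)) (min q (n - 1)) hd (le_max_left _ _)
        (by omega) (by omega)
        (fun i hi0 his => by
          simp only [pvEmit]
          rw [if_neg (by omega), if_neg (by omega)]
          rfl)
        (fun i hie hid => by
          simp only [pvEmit]
          rw [if_neg (by omega), if_neg (by omega)]
          rfl)
        out

lemma pvB_eq_flat (n m : Int) :
    generate_diagonals_py_alt n m
      = (PySem.List.pyRange 0 (n + m - 1) 1).flatMap (pvDiag n m) := by
  unfold generate_diagonals_py_alt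
  have hcong : ∀ d ∈ PySem.List.pyRange 0 (n + m - 1) 1, ∀ out : List (Int × Int),
      genDiagB n m out d = out ++ pvDiag n m d := by
    intro d hd out
    rw [PySem.List.mem_pyRange_one] at hd
    exact pvDiagB_eq n m d hd.1 out
  rw [PySem.List.foldl_congr_mem' _ _ _ [] hcong, PySem.List.foldl_append_eq_flatMap]
  simp

-- ===== VERDICT (by name: the statement is the Claim_ definition above) =====
theorem generate_diagonals_py_spec : Claim_equal_generate_diagonals_py := by
  intro n m _
  unfold Spec_generate_diagonals_py
  rw [pvA_eq_flat, pvB_eq_flat]
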